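-- pv_equiv track=rewrite | github.com/carosaut/advent-of-code-2025 | Day-2/Day-2-review.py | is_repeated_pattern
-- ===== SOURCE A (Python) =====
-- def is_repeated_pattern(num, divisor):
--     """Check if num can be split into equal repeated chunks."""
--     string_num = str(num)
--     length = len(string_num)
--
--     if length % divisor != 0:
--         return False
--
--     chunk_size = length // divisor
--     chunk = string_num[:chunk_size]
--
--     return all(string_num[i:i+chunk_size] == chunk for i in range(0, length, chunk_size))
-- ===== SOURCE B (Python) =====
-- def is_repeated_pattern(num, divisor):
--     """Check if num can be split into equal repeated chunks."""
--     string_num = str(num)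
--     length = len(string_num)
--
--     if length % divisor != 0:
--         return False
--
--     return string_num == string_num[:length // divisor] * divisor
-- ===== Notes on version B (the rewrite author's own statement) =====
-- stated objective: simpler
-- what changed: Instead of scanning the string chunk by chunk with all(...) over range(0, length, chunk_size), B builds the expected periodic string chunk * divisor once and does a single string equality comparison.
-- intended difference: For negative divisors that divide the length of str(num), A returns True because range(0, length, negative_step) is empty so all() is vacuously true, while B returns False, the intended value since a string cannot be split into a negative number of chunks. — e.g. on is_repeated_pattern(123, -1): A returns true, B returns false
import Mathlib
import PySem

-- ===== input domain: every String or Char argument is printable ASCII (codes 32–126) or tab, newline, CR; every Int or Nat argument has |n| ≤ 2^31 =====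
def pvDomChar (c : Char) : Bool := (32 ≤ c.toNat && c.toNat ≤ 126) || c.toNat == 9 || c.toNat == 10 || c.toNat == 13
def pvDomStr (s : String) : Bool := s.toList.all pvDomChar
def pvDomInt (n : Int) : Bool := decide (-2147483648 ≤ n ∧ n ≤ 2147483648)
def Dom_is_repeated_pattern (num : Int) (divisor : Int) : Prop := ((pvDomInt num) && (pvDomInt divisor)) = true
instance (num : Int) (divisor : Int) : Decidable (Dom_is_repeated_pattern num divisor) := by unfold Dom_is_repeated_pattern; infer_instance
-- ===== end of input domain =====

-- B replaces A's chunk-by-chunk all(...) scan by building the expected periodic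
-- string chunk * divisor once and comparing with one equality (objective: simpler).

-- ===== PORT A =====
def is_repeated_pattern (num : Int) (divisor : Int) : Bool :=
  let string_num : List Char := PySem.Int.toChars num   -- str(num)
  let length : Int := (string_num.length : Int)
  if PySem.Int.mod length divisor ≠ 0 then false
  else
    let chunk_size : Int := PySem.Int.floordiv length divisor
    let chunk : List Char := PySem.List.slice string_num none (some chunk_size)
    (PySem.List.pyRange 0 length chunk_size).all fun i =>
      PySem.List.slice string_num (some i) (some (i + chunk_size)) == chunk

-- ===== PORT B =====
def is_repeated_pattern_alt (num : Int) (divisor : Int) : Bool :=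
  let string_num : List Char := PySem.Int.toChars num   -- str(num)
  let length : Int := (string_num.length : Int)
  if PySem.Int.mod length divisor ≠ 0 then false
  else
    -- chunk * divisor: Python repeats max(divisor, 0) times
    string_num ==
      (List.replicate divisor.toNat
        (PySem.List.slice string_num none (some (PySem.Int.floordiv length divisor)))).flatten

-- ===== PRECONDITION & SPEC =====
-- Pre_ excludes exactly divisor = 0, where Python's `length % divisor` raises ZeroDivisionError.
def Pre_is_repeated_pattern (num : Int) (divisor : Int) : Prop := divisor ≠ 0
instance (num : Int) (divisor : Int) : Decidable (Pre_is_repeated_pattern num divisor) := by unfold Pre_is_repeated_pattern; infer_instance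
def pvWitness_is_repeated_pattern : Int × Int := (1212, 2)

-- For negative divisors that divide the length of str(num), A returns True because
-- range(0, length, negative_step) is empty so all() is vacuously true, while B returns
-- False, the intended value since a string cannot be split into a negative number of chunks.
def D_is_repeated_pattern (num : Int) (divisor : Int) : Prop :=
  divisor < 0 ∧ PySem.Int.mod (((PySem.Int.toChars num).length : Int)) divisor = 0
instance (num : Int) (divisor : Int) : Decidable (D_is_repeated_pattern num divisor) := by unfold D_is_repeated_pattern; infer_instance


def Spec_is_repeated_pattern (num : Int) (divisor : Int) (out : Bool) : Prop := ¬ D_is_repeated_pattern num divisor → out = is_repeated_pattern_alt num divisor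
instance (num : Int) (divisor : Int) (out : Bool) : Decidable (Spec_is_repeated_pattern num divisor out) := by unfold Spec_is_repeated_pattern; infer_instance

def pvDiffWitness_is_repeated_pattern : Int × Int := (123, -1)
def pvDiffWitnessOut_is_repeated_pattern : Bool × Bool := (true, false)

-- ===== CLAIM (what is proved, stated in full; the proofs are below) =====
def Claim_unchanged_is_repeated_pattern : Prop := ∀ (num : Int) (divisor : Int), Dom_is_repeated_pattern num divisor → Pre_is_repeated_pattern num divisor → Spec_is_repeated_pattern num divisor (is_repeated_pattern num divisor)
def Claim_changed_is_repeated_pattern : Prop := Dom_is_repeated_pattern (pvDiffWitness_is_repeated_pattern.1) (pvDiffWitness_is_repeated_pattern.2) ∧ Pre_is_repeated_pattern (pvDiffWitness_is_repeated_pattern.1) (pvDiffWitness_is_repeated_pattern.2) ∧ D_is_repeated_pattern (pvDiffWitness_is_repeated_pattern.1) (pvDiffWitness_is_repeated_pattern.2) ∧ is_repeated_pattern (pvDiffWitness_is_repeated_pattern.1) (pvDiffWitness_is_repeated_pattern.2) = pvDiffWitnessOut_is_repeated_pattern.1 ∧ is_repeated_pattern_alt (pvDiffWitness_is_repeated_pattern.1)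 (pvDiffWitness_is_repeated_pattern.2) = pvDiffWitnessOut_is_repeated_pattern.2 ∧ pvDiffWitnessOut_is_repeated_pattern.1 ≠ pvDiffWitnessOut_is_repeated_pattern.2
def Claim_exact_is_repeated_pattern : Prop := ∀ (num : Int) (divisor : Int), Dom_is_repeated_pattern num divisor → Pre_is_repeated_pattern num divisor → D_is_repeated_pattern num divisor → is_repeated_pattern num divisor ≠ is_repeated_pattern_alt num divisor

-- ===== LEMMAS AND PROOFS =====

lemma toChars_ne_nil (n : Int) : PySem.Int.toChars n ≠ [] := by
  unfold PySem.Int.toChars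
  split
  · simp
  · exact List.ne_nil_of_length_pos Nat.length_toDigits_pos

-- a list of length d*k is d repetitions of the length-k block c iff every k-aligned window is c
lemma chunks_iff {α : Type} [DecidableEq α] (d k : Nat) (c : List α) :
    ∀ s : List α, c.length = k → s.length = d * k →
      ((∀ j < d, (s.drop (k * j)).take k = c) ↔ s = (List.replicate d c).flatten) := by
  induction d with
  | zero =>
    intro s _ hs
    simp only [Nat.zero_mul, List.length_eq_zero_iff] at hs
    subst hs
    simp
  | succ d ih =>
    intro s hc hs
    have hdrop : (s.drop k).length = d * k := by
      rw [List.length_drop, hs, Nat.succ_mul]; omega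
    constructor
    · intro h
      have h0 : s.take k = c := by simpa using h 0 (Nat.succ_pos d)
      have hrest : s.drop k = (List.replicate d c).flatten := by
        refine (ih (s.drop k) hc hdrop).mp ?_
        intro j hj
        rw [List.drop_drop, show k + k * j = k * (j + 1) from by ring]
        exact h (j + 1) (by omega)
      rw [List.replicate_succ, List.flatten_cons, ← hrest, ← h0, List.take_append_drop]
    · intro h
      have hsplit : s = c ++ (List.replicate d c).flatten := by
        rw [h, List.replicate_succ, List.flatten_cons]
      have hdropk : s.drop k = (List.replicate d c).flatten := by
        rw [hsplit]; exact List.drop_left' hc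
      have hflen : (List.replicate d c).flatten.length = d * k := by
        rw [← hdropk, List.length_drop, hs, Nat.succ_mul]; omega
      intro j hj
      cases j with
      | zero =>
        rw [Nat.mul_zero, List.drop_zero, hsplit]
        exact List.take_left' hc
      | succ j =>
        rw [show k * (j + 1) = k + k * j from by ring, ← List.drop_drop, hdropk]
        exact (ih _ hc hflen).mpr rfl j (by omega)

-- ===== VERDICT (by name: the statement is the Claim_ definition above) =====
theorem is_repeated_pattern_spec : Claim_unchanged_is_repeated_pattern := by
  intro num divisor _ hpre hnd
  unfold D_is_repeated_pattern at hnd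
  simp only [is_repeated_pattern, is_repeated_pattern_alt]
  set s : List Char := PySem.Int.toChars num with hsdef
  by_cases hm : PySem.Int.mod (s.length : Int) divisor = 0
  · rw [if_neg (by simp [hm]), if_neg (by simp [hm])]
    have hdvd : divisor ∣ (s.length : Int) := (PySem.Int.mod_eq_zero_iff_dvd _ _).mp hm
    have hpos : 0 < divisor := by
      rcases lt_trichotomy divisor 0 with h | h | h
      · exact absurd ⟨h, hm⟩ hnd
      · exact absurd h hpre
      · exact h
    set d : Nat := divisor.toNat with hddef
    have hdd : divisor = (d : Int) := by omega
    have hd1 : 1 ≤ d := by omega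
    have hdvdn : d ∣ s.length := by
      rwa [hdd, Int.natCast_dvd_natCast] at hdvd
    set k : Nat := s.length / d with hkdef
    have hkd : s.length = d * k := (Nat.div_mul_cancel hdvdn).symm.trans (Nat.mul_comm k d)
    have hk0 : 0 < k := by
      rcases Nat.eq_zero_or_pos k with h | h
      · have hs0 : s.length = 0 := by rw [hkd, h, Nat.mul_zero]
        exact absurd (List.eq_nil_of_length_eq_zero hs0) (toChars_ne_nil num)
      · exact h
    have hk1 : (1 : Int) ≤ (k : Int) := by exact_mod_cast hk0
    have hsk : k ≤ s.length := by
      rw [hkd]; exact Nat.le_mul_of_pos_left k (by omega)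
    have hL : (0 : Int) < (s.length : Int) := by
      have := List.length_pos_iff.mpr (toChars_ne_nil num)
      exact_mod_cast this
    have hfd : PySem.Int.floordiv (s.length : Int) divisor = (k : Int) := by
      rw [PySem.Int.floordiv_eq_ediv_of_pos hpos, hdd, hkd]
      push_cast
      rw [Int.mul_ediv_cancel_left _ (by omega : (d : Int) ≠ 0)]
    have hsl : ∀ j : Nat,
        PySem.List.slice s (some (0 + (k : Int) * (j : Int))) (some (0 + (k : Int) * (j : Int) + (k : Int))) =
          (s.drop (k * j)).take k := by
      intro j
      have e2 : (0 + (k : Int) * (j : Int) + (k : Int)) = ((k * j : Nat) : Int) + ((k : Nat) : Int) := by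
        push_cast; ring
      have e1 : (0 + (k : Int) * (j : Int)) = ((k * j : Nat) : Int) := by push_cast; ring
      rw [e2, e1, PySem.List.slice_natCast_add]
    rw [hfd, PySem.List.slice_to_natCast]
    rw [PySem.List.pyRange_of_pos 0 (s.length : Int) (by omega : (0 : Int) < (k : Int))]
    rw [if_pos hL]
    rw [show ((s.length : Int) - 0 + (k : Int) - 1) / (k : Int) = (d : Int) from by
      rw [show ((s.length : Int) - 0 + (k : Int) - 1) = ((k : Int) - 1) + (k : Int) * (d : Int) from by
        rw [hkd]; push_cast; ring]
      rw [Int.add_mul_ediv_left _ _ (by omega : (k : Int) ≠ 0),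
        Int.ediv_eq_zero_of_lt (by omega) (by omega)]
      ring]
    rw [Int.toNat_natCast, List.all_map, Bool.eq_iff_iff]
    simp only [List.all_eq_true, List.mem_range, Function.comp_apply, beq_iff_eq, hsl]
    exact chunks_iff d k (s.take k) s (by rw [List.length_take]; omega) hkd
  · rw [if_pos (by simpa using hm), if_pos (by simpa using hm)]

theorem is_repeated_pattern_changed : Claim_changed_is_repeated_pattern := by
  unfold Claim_changed_is_repeated_pattern; decide

theorem is_repeated_pattern_tight : Claim_exact_is_repeated_pattern := by
  intro num divisor _ _ hd
  unfold D_is_repeated_pattern at hd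
  obtain ⟨hneg, hm⟩ := hd
  simp only [is_repeated_pattern, is_repeated_pattern_alt]
  set s : List Char := PySem.Int.toChars num with hsdef
  rw [if_neg (by simp [hm]), if_neg (by simp [hm])]
  have hL : (0 : Int) < (s.length : Int) := by
    have := List.length_pos_iff.mpr (toChars_ne_nil num)
    exact_mod_cast this
  have hfneg : PySem.Int.floordiv (s.length : Int) divisor < 0 := by
    by_contra hcon
    have hcon' : 0 ≤ PySem.Int.floordiv (s.length : Int) divisor := by omega
    have hb := PySem.Int.floordiv_mul_add_mod (s.length : Int) divisor
    have hmb := PySem.Int.mod_neg_bounds (a := (s.length : Int)) (b := divisor) hneg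
    have : PySem.Int.floordiv (s.length : Int) divisor * divisor ≤ 0 :=
      mul_nonpos_of_nonneg_of_nonpos hcon' (le_of_lt hneg)
    omega
  have hrange : PySem.List.pyRange 0 (s.length : Int)
      (PySem.Int.floordiv (s.length : Int) divisor) = [] := by
    have h1 : ¬ (PySem.Int.floordiv (s.length : Int) divisor = 0) := by omega
    have h2 : ¬ ((0 : Int) < PySem.Int.floordiv (s.length : Int) divisor) := by omega
    have h3 : ¬ ((s.length : Int) < 0) := by omega
    simp [PySem.List.pyRange, h1, h2, h3]
  rw [hrange, show divisor.toNat = 0 from by omega]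
  simp only [List.all_nil, List.replicate_zero, List.flatten_nil]
  have hne : s ≠ [] := toChars_ne_nil num
  simp [hne]
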